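-- pv_equiv track=rewrite | github.com/ilokaHZhou/InterviewAndLeetocodes | H/面试/智能驾驶.py | can_reach_destination
-- ===== SOURCE A (Python) =====
-- import heapq
--
-- MAX_FUEL = 100
--
-- def can_reach_destination(map_data, start_fuel, numRows, numCols):
--     # 如果起点是障碍物，则无法出发
--     if map_data[0][0] == 0:
--         return False
--
--     # 初始化存储每个单元格剩余油量的二维列表
--     remaining_fuel = [[-1 for _ in range(numCols)] for _ in range(numRows)]
--     # 设置起点的初始油量，考虑起点可能为负值消耗的情况
--     remaining_fuel[0][0] = MAX_FUEL if map_data[0][0] == -1 else start_fuel - map_data[0][0]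
--     if remaining_fuel[0][0] < 0:
--         return False  # 起始油量不足以离开起点
--
--     # 使用优先队列，以最大剩余油量优先处理
--     priority_queue = []
--     heapq.heappush(priority_queue, (-remaining_fuel[0][0], 0, 0))
--     directions = [(0, 1), (1, 0), (0, -1), (-1, 0)]  # 定义上下左右四个方向
--
--     # 使用优先队列执行BFS
--     while priority_queue:
--         current_fuel, current_row, current_col = heapq.heappop(priority_queue)
--         current_fuel = -current_fuel  # 因为用了负值来实现最大堆
--
--         # 到达终点检查
--         if current_row == numRows - 1 and current_col == numCols - 1:
--             return True
--
--         # 检查四个可能的移动方向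
--         for dx, dy in directions:
--             new_row, new_col = current_row + dx, current_col + dy
--             if is_valid(new_row, new_col, numRows, numCols, map_data):
--                 new_fuel = MAX_FUEL if map_data[new_row][new_col] == -1 else current_fuel - map_data[new_row][new_col]
--                 if new_fuel > remaining_fuel[new_row][new_col]:
--                     remaining_fuel[new_row][new_col] = new_fuel
--                     heapq.heappush(priority_queue, (-new_fuel, new_row, new_col))
--
--     return False  # 如果没有找到到达终点的路径则返回False
--
-- def is_valid(row, col, numRows, numCols, map_data):
--     # 检查位置是否有效（不越界且不是障碍物）
--     return 0 <= row < numRows and 0 <= col < numCols and map_data[row][col] != 0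
-- ===== SOURCE B (Python) =====
-- MAX_FUEL = 100
--
-- def can_reach_destination(map_data, start_fuel, numRows, numCols):
--     if map_data[0][0] == 0:
--         return False
--     remaining_fuel = [[-1] * numCols for _ in range(numRows)]
--     remaining_fuel[0][0] = MAX_FUEL if map_data[0][0] == -1 else start_fuel - map_data[0][0]
--     if remaining_fuel[0][0] < 0:
--         return False
--     # Gauss-Seidel relaxation sweeps: repeat full-grid passes until no cell's
--     # best-known remaining fuel improves any neighbour, then test the corner.
--     changed = True
--     while changed:
--         changed = False
--         for r in range(numRows):
--             for c in range(numCols):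
--                 fuel = remaining_fuel[r][c]
--                 if fuel < 0:
--                     continue
--                 for nr, nc in ((r, c + 1), (r + 1, c), (r, c - 1), (r - 1, c)):
--                     if 0 <= nr < numRows and 0 <= nc < numCols and map_data[nr][nc] != 0:
--                         nf = MAX_FUEL if map_data[nr][nc] == -1 else fuel - map_data[nr][nc]
--                         if nf > remaining_fuel[nr][nc]:
--                             remaining_fuel[nr][nc] = nf
--                             changed = True
--     return remaining_fuel[numRows - 1][numCols - 1] >= 0
-- ===== Notes on version B (the rewrite author's own statement) =====
-- stated objective: alternative
-- what changed: Replaces the max-heap best-first search with early return at the destination by queue-free Gauss-Seidel relaxation sweeps that rerun until the remaining-fuel grid reaches its fixed point, then reads the corner cell; both compute the same least fuel fixed point.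
-- outside the precondition, e.g. on can_reach_destination([[1, -5]], 10, 1, 2): A returns True, B does not finish within the time limit; on can_reach_destination([[1, 0], [0, 5]], 5, 2, 5): A returns False, B returns False
import Mathlib
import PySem

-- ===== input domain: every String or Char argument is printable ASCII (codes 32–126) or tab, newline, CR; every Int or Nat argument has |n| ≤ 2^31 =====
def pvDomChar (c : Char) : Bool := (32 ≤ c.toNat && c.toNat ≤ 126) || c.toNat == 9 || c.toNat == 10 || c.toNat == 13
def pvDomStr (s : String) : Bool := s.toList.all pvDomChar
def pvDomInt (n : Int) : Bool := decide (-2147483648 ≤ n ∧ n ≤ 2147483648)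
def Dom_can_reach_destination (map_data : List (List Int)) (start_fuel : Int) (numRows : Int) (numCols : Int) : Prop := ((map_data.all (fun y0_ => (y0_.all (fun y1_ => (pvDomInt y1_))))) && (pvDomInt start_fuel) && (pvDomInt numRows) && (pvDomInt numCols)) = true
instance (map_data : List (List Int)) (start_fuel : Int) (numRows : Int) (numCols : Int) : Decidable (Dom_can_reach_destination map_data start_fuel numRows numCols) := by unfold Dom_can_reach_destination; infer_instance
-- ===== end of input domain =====

-- B replaces A's max-heap best-first search (with early return at the destination) by queue-free
-- Gauss-Seidel relaxation sweeps iterated to the fixed point of the remaining-fuel grid (objective: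
-- alternative algorithm, similar cost; equivalence is about the return value only).

-- ===== PORT A =====
def pvAt (m : List (List Int)) (r c : Nat) : Int := (m.getD r []).getD c 0
def pvCell (m : List (List Int)) (r c : Int) : Int := pvAt m r.toNat c.toNat
def pvSetCell (m : List (List Int)) (r c : Int) (x : Int) : List (List Int) :=
  m.set r.toNat ((m.getD r.toNat []).set c.toNat x)
def pvIsValid (row col numRows numCols : Int) (map_data : List (List Int)) : Bool :=
  decide (0 ≤ row) && decide (row < numRows) && decide (0 ≤ col) && decide (col < numCols) &&
    decide (pvCell map_data row col ≠ 0)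
def pvDirs : List (Int × Int) := [(0,1),(1,0),(0,-1),(-1,0)]
def pvLt (a b : Int × Int × Int) : Bool :=
  decide (a.1 < b.1) || (decide (a.1 = b.1) &&
    (decide (a.2.1 < b.2.1) || (decide (a.2.1 = b.2.1) && decide (a.2.2 < b.2.2))))
-- heapq contract: heappop removes the tuple-lexicographically smallest entry (all entries are distinct here)
def pvMinEntry (t : Int × Int × Int) (ts : List (Int × Int × Int)) : Int × Int × Int :=
  ts.foldl (fun m x => if pvLt x m then x else m) t
def pvRelaxA (map_data : List (List Int)) (numRows numCols : Int) (e : Int × Int × Int)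
    (st : List (Int × Int × Int) × List (List Int)) (d : Int × Int) :
    List (Int × Int × Int) × List (List Int) :=
  let nr := e.2.1 + d.1
  let nc := e.2.2 + d.2
  if pvIsValid nr nc numRows numCols map_data then
    let nf := if pvCell map_data nr nc = -1 then 100 else (-e.1) - pvCell map_data nr nc
    if pvCell st.2 nr nc < nf then ((-nf, nr, nc) :: st.1, pvSetCell st.2 nr nc nf) else st
  else st
-- fuel only makes the while-loop total; the proofs show it never runs out inside Pre_
def pvFuelA (start_fuel numRows numCols : Int) : Nat :=
  (2 * (numRows * numCols) * (max start_fuel 100 + 1) + 2).toNat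
def pvLoopA (map_data : List (List Int)) (numRows numCols : Int) :
    Nat → List (Int × Int × Int) → List (List Int) → Bool
  | 0, _, _ => false
  | _ + 1, [], _ => false
  | fuel + 1, t :: ts, rem =>
    let e := pvMinEntry t ts
    let q' := (t :: ts).erase e
    if e.2.1 = numRows - 1 ∧ e.2.2 = numCols - 1 then true
    else
      let st := pvDirs.foldl (pvRelaxA map_data numRows numCols e) (q', rem)
      pvLoopA map_data numRows numCols fuel st.1 st.2
def can_reach_destination (map_data : List (List Int)) (start_fuel : Int) (numRows : Int) (numCols : Int) : Bool :=
  if pvCell map_data 0 0 = 0 then false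
  else
    let s0 := if pvCell map_data 0 0 = -1 then 100 else start_fuel - pvCell map_data 0 0
    let rem := pvSetCell (List.replicate numRows.toNat (List.replicate numCols.toNat (-1))) 0 0 s0
    if s0 < 0 then false
    else pvLoopA map_data numRows numCols (pvFuelA start_fuel numRows numCols) [(-s0, 0, 0)] rem

-- ===== PORT B =====
def pvNbrs (r c : Int) : List (Int × Int) := [(r, c+1), (r+1, c), (r, c-1), (r-1, c)]
def pvRelaxB (map_data : List (List Int)) (numRows numCols fuelv : Int)
    (st : List (List Int) × Bool) (v : Int × Int) : List (List Int) × Bool :=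
  if decide (0 ≤ v.1) && decide (v.1 < numRows) && decide (0 ≤ v.2) && decide (v.2 < numCols) &&
      decide (pvCell map_data v.1 v.2 ≠ 0) then
    let nf := if pvCell map_data v.1 v.2 = -1 then 100 else fuelv - pvCell map_data v.1 v.2
    if pvCell st.1 v.1 v.2 < nf then (pvSetCell st.1 v.1 v.2 nf, true) else st
  else st
def pvSweepCell (map_data : List (List Int)) (numRows numCols : Int)
    (st : List (List Int) × Bool) (p : Int × Int) : List (List Int) × Bool :=
  let fuelv := pvCell st.1 p.1 p.2
  if fuelv < 0 then st
  else (pvNbrs p.1 p.2).foldl (pvRelaxB map_data numRows numCols fuelv) st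
def pvCells (numRows numCols : Int) : List (Int × Int) :=
  (List.range numRows.toNat).flatMap (fun r => (List.range numCols.toNat).map (fun c => (Int.ofNat r, Int.ofNat c)))
-- fuel only makes the while-loop total; the proofs show it never runs out inside Pre_
def pvFuelB (start_fuel numRows numCols : Int) : Nat :=
  ((numRows * numCols) * (max start_fuel 100 + 1) + 1).toNat
def pvLoopB (map_data : List (List Int)) (numRows numCols : Int) :
    Nat → List (List Int) → List (List Int)
  | 0, rem => rem
  | fuel + 1, rem =>
    let st := (pvCells numRows numCols).foldl (pvSweepCell map_data numRows numCols) (rem, false)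
    if st.2 then pvLoopB map_data numRows numCols fuel st.1 else st.1
def can_reach_destination_alt (map_data : List (List Int)) (start_fuel : Int) (numRows : Int) (numCols : Int) : Bool :=
  if pvCell map_data 0 0 = 0 then false
  else
    let s0 := if pvCell map_data 0 0 = -1 then 100 else start_fuel - pvCell map_data 0 0
    let rem := pvSetCell (List.replicate numRows.toNat (List.replicate numCols.toNat (-1))) 0 0 s0
    if s0 < 0 then false
    else decide (0 ≤ pvCell (pvLoopB map_data numRows numCols (pvFuelB start_fuel numRows numCols) rem) (numRows - 1) (numCols - 1))

-- ===== PRECONDITION & SPEC =====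
-- Pre_ excludes inputs on which A raises (stated dimensions exceeding the actual grid, nonpositive
-- dimensions) or on which A's relaxation can loop forever (cost entries below -1 make the remaining
-- fuel grow without bound); the rare inputs of those shapes on which A still happens to return are
-- excluded with them (see the cited examples).
def Pre_can_reach_destination (map_data : List (List Int)) (start_fuel : Int) (numRows : Int) (numCols : Int) : Prop :=
  (map_data ≠ [] ∧ map_data.headD [] ≠ [] ∧ pvAt map_data 0 0 = 0)
  ∨ (1 ≤ numRows ∧ 1 ≤ numCols ∧ map_data ≠ [] ∧ map_data.headD [] ≠ [] ∧
      pvAt map_data 0 0 ≠ -1 ∧ start_fuel - pvAt map_data 0 0 < 0)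
  ∨ (1 ≤ numRows ∧ 1 ≤ numCols ∧ numRows ≤ (map_data.length : Int) ∧
      (∀ r ∈ List.range numRows.toNat, numCols ≤ ((map_data.getD r []).length : Int)) ∧
      (∀ r ∈ List.range numRows.toNat, ∀ c ∈ List.range numCols.toNat, -1 ≤ pvAt map_data r c))
instance (map_data : List (List Int)) (start_fuel : Int) (numRows : Int) (numCols : Int) : Decidable (Pre_can_reach_destination map_data start_fuel numRows numCols) := by
  unfold Pre_can_reach_destination; infer_instance
def pvWitness_can_reach_destination : List (List Int) × Int × Int × Int := ([[1, 2], [3, -1]], 5, 2, 2)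
def Spec_can_reach_destination (map_data : List (List Int)) (start_fuel : Int) (numRows : Int) (numCols : Int) (out : Bool) : Prop := out = can_reach_destination_alt map_data start_fuel numRows numCols
instance (map_data : List (List Int)) (start_fuel : Int) (numRows : Int) (numCols : Int) (out : Bool) : Decidable (Spec_can_reach_destination map_data start_fuel numRows numCols out) := by unfold Spec_can_reach_destination; infer_instance

-- ===== CLAIM (what is proved, stated in full; the proofs are below) =====
def Claim_equal_can_reach_destination : Prop := ∀ (map_data : List (List Int)) (start_fuel : Int) (numRows : Int) (numCols : Int), Dom_can_reach_destination map_data start_fuel numRows numCols → Pre_can_reach_destination map_data start_fuel numRows numCols → Spec_can_reach_destination map_data start_fuel numRows numCols (can_reach_destination map_data start_fuel numRows numCols)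

-- ===== LEMMAS AND PROOFS =====


-- ---------- proof-side notions ----------
def Inb (nR nC : Int) (u : Int × Int) : Prop := 0 ≤ u.1 ∧ u.1 < nR ∧ 0 ≤ u.2 ∧ u.2 < nC
def gLook (g : List (List Int)) (u : Int × Int) : Int := pvCell g u.1 u.2
def ValidC (m : List (List Int)) (nR nC : Int) (u : Int × Int) : Prop :=
  Inb nR nC u ∧ pvCell m u.1 u.2 ≠ 0
def stepF (m : List (List Int)) (k : Int) (v : Int × Int) : Int :=
  if pvCell m v.1 v.2 = -1 then 100 else k - pvCell m v.1 v.2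
def Shape (nR nC : Int) (g : List (List Int)) : Prop :=
  g.length = nR.toNat ∧ ∀ row ∈ g, row.length = nC.toNat
def GridGE (g : List (List Int)) : Prop := ∀ row ∈ g, ∀ x ∈ row, -1 ≤ x
def GridLE (B : Int) (g : List (List Int)) : Prop := ∀ row ∈ g, ∀ x ∈ row, x ≤ B
def MOK (m : List (List Int)) (nR nC : Int) : Prop :=
  ∀ u : Int × Int, Inb nR nC u → -1 ≤ pvCell m u.1 u.2
def ClosedAbove (m : List (List Int)) (nR nC s0 : Int) (h : Int × Int → Int) : Prop :=
  (∀ u, Inb nR nC u → -1 ≤ h u) ∧ s0 ≤ h (0, 0) ∧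
    (∀ u, ValidC m nR nC u → 0 ≤ h u →
      ∀ v ∈ pvNbrs u.1 u.2, ValidC m nR nC v → stepF m (h u) v ≤ h v)
def ClosedAt (m : List (List Int)) (nR nC : Int) (g : List (List Int)) (u : Int × Int) : Prop :=
  ∀ v ∈ pvNbrs u.1 u.2, ValidC m nR nC v → stepF m (gLook g u) v ≤ gLook g v
def rowSum (B : Int) (row : List Int) : Int := (row.map (fun x => B - x)).sum
def SumDef (B : Int) (g : List (List Int)) : Int := (g.map (rowSum B)).sum

structure InvG (m : List (List Int)) (nR nC s0 B : Int) (g : List (List Int)) : Prop where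
  shape : Shape nR nC g
  ge : GridGE g
  le : GridLE B g
  lb : s0 ≤ gLook g (0, 0)
  vok : ∀ u, Inb nR nC u → 0 ≤ gLook g u → ValidC m nR nC u
  ub : ∀ h, ClosedAbove m nR nC s0 h → ∀ u, Inb nR nC u → gLook g u ≤ h u

structure InvA (m : List (List Int)) (nR nC s0 B : Int)
    (q : List (Int × Int × Int)) (g : List (List Int)) : Prop where
  grid : InvG m nR nC s0 B g
  qmem : ∀ e ∈ q, ValidC m nR nC e.2 ∧ 0 ≤ -e.1 ∧ -e.1 ≤ gLook g e.2
  nodup : q.Nodup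
  destq : 0 ≤ gLook g (nR - 1, nC - 1) → ∃ e ∈ q, e.2 = (nR - 1, nC - 1)
  closure : ∀ u, Inb nR nC u → 0 ≤ gLook g u →
    (∃ e ∈ q, e.2 = u ∧ -e.1 = gLook g u) ∨ ClosedAt m nR nC g u

-- ---------- list-level helpers ----------
lemma sum_map_set {α : Type} [Inhabited α] (f : α → Int) (l : List α) (i : Nat) (x : α)
    (h : i < l.length) :
    ((l.set i x).map f).sum = (l.map f).sum - f (l.getD i x) + f x := by
  induction l generalizing i with
  | nil => simp at h
  | cons a t ih =>
    cases i with
    | zero => simp [List.set]; ring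
    | succ j =>
      simp only [List.set, List.map, List.sum_cons, List.getD, List.getElem?_cons_succ]
      rw [ih j (by simpa using h)]
      simp [List.getD]
      ring

lemma getD_set_self (l : List Int) (c : Nat) (x : Int) (hc : c < l.length) :
    (l.set c x).getD c 0 = x := by
  rw [List.getD_eq_getElem?_getD, List.getElem?_set_self hc]; rfl

lemma getD_set_ne (l : List Int) (c c' : Nat) (x : Int) (h : c ≠ c') :
    (l.set c x).getD c' 0 = l.getD c' 0 := by
  rw [List.getD_eq_getElem?_getD, List.getElem?_set_ne h, ← List.getD_eq_getElem?_getD]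

lemma pvAt_set (g : List (List Int)) (r c : Nat) (x : Int) (r' c' : Nat)
    (hr : r < g.length) (hc : c < (g.getD r []).length) :
    pvAt (g.set r ((g.getD r []).set c x)) r' c' = if r = r' ∧ c = c' then x else pvAt g r' c' := by
  unfold pvAt
  by_cases h1 : r = r'
  · subst h1
    have hrow : (g.set r ((g.getD r []).set c x)).getD r [] = (g.getD r []).set c x := by
      rw [List.getD_eq_getElem?_getD, List.getElem?_set_self (by omega)]; rfl
    rw [hrow]
    by_cases h2 : c = c'
    · subst h2; rw [if_pos ⟨rfl, rfl⟩]; exact getD_set_self _ _ _ hc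
    · rw [if_neg (by tauto)]; exact getD_set_ne _ _ _ _ h2
  · have hrow : (g.set r ((g.getD r []).set c x)).getD r' [] = g.getD r' [] := by
      rw [List.getD_eq_getElem?_getD, List.getElem?_set_ne h1, ← List.getD_eq_getElem?_getD]
    rw [hrow, if_neg (by tauto)]

lemma row_mem (g : List (List Int)) (r : Nat) (hr : r < g.length) : g.getD r [] ∈ g := by
  rw [List.getD_eq_getElem?_getD, List.getElem?_eq_getElem hr]
  exact List.getElem_mem hr

lemma entry_mem (row : List Int) (c : Nat) (hc : c < row.length) : row.getD c 0 ∈ row := by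
  rw [List.getD_eq_getElem?_getD, List.getElem?_eq_getElem hc]
  exact List.getElem_mem hc

-- ---------- grid-level helpers ----------
lemma row_len (nR nC : Int) (g : List (List Int)) (hs : Shape nR nC g) (r : Nat)
    (hr : r < g.length) : (g.getD r []).length = nC.toNat :=
  hs.2 _ (row_mem g r hr)

lemma gLook_set (nR nC : Int) (g : List (List Int)) (hs : Shape nR nC g)
    (v : Int × Int) (hv : Inb nR nC v) (x : Int) (w : Int × Int) (hw : Inb nR nC w) :
    gLook (pvSetCell g v.1 v.2 x) w = if v = w then x else gLook g w := by
  obtain ⟨hv1, hv2, hv3, hv4⟩ := hv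
  obtain ⟨hw1, hw2, hw3, hw4⟩ := hw
  have hr : v.1.toNat < g.length := by rw [hs.1]; omega
  have hc : v.2.toNat < (g.getD v.1.toNat []).length := by rw [row_len nR nC g hs _ hr]; omega
  have := pvAt_set g v.1.toNat v.2.toNat x w.1.toNat w.2.toNat hr hc
  unfold gLook pvCell pvSetCell
  rw [this]
  by_cases h : v = w
  · subst h; rw [if_pos ⟨rfl, rfl⟩, if_pos rfl]
  · rw [if_neg, if_neg h]
    intro ⟨e1, e2⟩
    exact h (Prod.ext (by omega) (by omega))

lemma shape_set (nR nC : Int) (g : List (List Int)) (hs : Shape nR nC g)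
    (v : Int × Int) (hv : Inb nR nC v) (x : Int) :
    Shape nR nC (pvSetCell g v.1 v.2 x) := by
  constructor
  · rw [pvSetCell, List.length_set, hs.1]
  · intro row hrow
    rcases List.mem_or_eq_of_mem_set hrow with h | h
    · exact hs.2 _ h
    · subst h
      rw [List.length_set]
      exact row_len nR nC g hs _ (by rw [hs.1]; rcases hv with ⟨a,b,c,d⟩; omega)

lemma ge_set (nR nC : Int) (g : List (List Int)) (hs : Shape nR nC g) (hg : GridGE g)
    (v : Int × Int) (hv : Inb nR nC v) (x : Int) (hx : -1 ≤ x) :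
    GridGE (pvSetCell g v.1 v.2 x) := by
  have hr : v.1.toNat < g.length := by rw [hs.1]; rcases hv with ⟨a,b,c,d⟩; omega
  intro row hrow y hy
  rcases List.mem_or_eq_of_mem_set hrow with h | h
  · exact hg _ h _ hy
  · subst h
    rcases List.mem_or_eq_of_mem_set hy with h2 | h2
    · exact hg _ (row_mem g _ hr) _ h2
    · omega

lemma le_set (nR nC B : Int) (g : List (List Int)) (hs : Shape nR nC g) (hg : GridLE B g)
    (v : Int × Int) (hv : Inb nR nC v) (x : Int) (hx : x ≤ B) :
    GridLE B (pvSetCell g v.1 v.2 x) := by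
  have hr : v.1.toNat < g.length := by rw [hs.1]; rcases hv with ⟨a,b,c,d⟩; omega
  intro row hrow y hy
  rcases List.mem_or_eq_of_mem_set hrow with h | h
  · exact hg _ h _ hy
  · subst h
    rcases List.mem_or_eq_of_mem_set hy with h2 | h2
    · exact hg _ (row_mem g _ hr) _ h2
    · omega

lemma ge_gLook (nR nC : Int) (g : List (List Int)) (hs : Shape nR nC g) (hg : GridGE g)
    (u : Int × Int) (hu : Inb nR nC u) : -1 ≤ gLook g u := by
  have hr : u.1.toNat < g.length := by rw [hs.1]; rcases hu with ⟨a,b,c,d⟩; omega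
  have hc : u.2.toNat < (g.getD u.1.toNat []).length := by
    rw [row_len nR nC g hs _ hr]; rcases hu with ⟨a,b,c,d⟩; omega
  exact hg _ (row_mem g _ hr) _ (entry_mem _ _ hc)

lemma le_gLook (nR nC B : Int) (g : List (List Int)) (hs : Shape nR nC g) (hg : GridLE B g)
    (u : Int × Int) (hu : Inb nR nC u) : gLook g u ≤ B := by
  have hr : u.1.toNat < g.length := by rw [hs.1]; rcases hu with ⟨a,b,c,d⟩; omega
  have hc : u.2.toNat < (g.getD u.1.toNat []).length := by
    rw [row_len nR nC g hs _ hr]; rcases hu with ⟨a,b,c,d⟩; omega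
  exact hg _ (row_mem g _ hr) _ (entry_mem _ _ hc)

lemma sumdef_set (nR nC B : Int) (g : List (List Int)) (hs : Shape nR nC g)
    (v : Int × Int) (hv : Inb nR nC v) (x : Int) :
    SumDef B (pvSetCell g v.1 v.2 x) = SumDef B g + gLook g v - x := by
  have hr : v.1.toNat < g.length := by rw [hs.1]; rcases hv with ⟨a,b,c,d⟩; omega
  have hc : v.2.toNat < (g.getD v.1.toNat []).length := by
    rw [row_len nR nC g hs _ hr]; rcases hv with ⟨a,b,c,d⟩; omega
  unfold SumDef pvSetCell
  rw [sum_map_set (rowSum B) g v.1.toNat _ hr]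
  have e1 : g.getD v.1.toNat ((g.getD v.1.toNat []).set v.2.toNat x) = g.getD v.1.toNat [] := by
    rw [List.getD_eq_getElem _ _ hr, List.getD_eq_getElem _ _ hr]
  rw [e1]
  unfold rowSum
  rw [sum_map_set (fun y => B - y) (g.getD v.1.toNat []) v.2.toNat x hc]
  have e3 : (g.getD v.1.toNat []).getD v.2.toNat x = gLook g v := by
    unfold gLook pvCell pvAt
    rw [List.getD_eq_getElem _ _ hc, List.getD_eq_getElem _ _ hc]
  rw [e3]
  ring

lemma sumdef_nonneg (B : Int) (g : List (List Int)) (hg : GridLE B g) : 0 ≤ SumDef B g := by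
  apply List.sum_nonneg
  intro a ha
  rcases List.mem_map.mp ha with ⟨row, hrow, rfl⟩
  apply List.sum_nonneg
  intro b hb
  rcases List.mem_map.mp hb with ⟨y, hy, rfl⟩
  have := hg _ hrow _ hy
  omega

-- ---------- direction / neighbour facts ----------
lemma dir_to_nbr (u : Int × Int) (d : Int × Int) (hd : d ∈ pvDirs) :
    (u.1 + d.1, u.2 + d.2) ∈ pvNbrs u.1 u.2 := by
  rcases u with ⟨r, c⟩
  simp only [pvDirs, List.mem_cons, List.not_mem_nil, or_false] at hd
  rcases hd with rfl | rfl | rfl | rfl <;> simp [pvNbrs, Prod.ext_iff] <;> omega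

lemma nbr_ne_self (u : Int × Int) (v : Int × Int) (hv : v ∈ pvNbrs u.1 u.2) : v ≠ u := by
  rcases u with ⟨r, c⟩
  simp only [pvNbrs, List.mem_cons, List.not_mem_nil, or_false] at hv
  rcases hv with rfl | rfl | rfl | rfl <;> (intro h; rw [Prod.ext_iff] at h; omega)

lemma dir_nbr_ne_self (u : Int × Int) (d : Int × Int) (hd : d ∈ pvDirs) :
    (u.1 + d.1, u.2 + d.2) ≠ u := nbr_ne_self u _ (dir_to_nbr u d hd)

lemma nbr_to_dir (u : Int × Int) (v : Int × Int) (hv : v ∈ pvNbrs u.1 u.2) :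
    ∃ d ∈ pvDirs, v = (u.1 + d.1, u.2 + d.2) := by
  rcases u with ⟨r, c⟩
  simp only [pvNbrs, List.mem_cons, List.not_mem_nil, or_false] at hv
  rcases hv with rfl | rfl | rfl | rfl
  · exact ⟨(0,1), by simp [pvDirs], by simp⟩
  · exact ⟨(1,0), by simp [pvDirs], by simp⟩
  · exact ⟨(0,-1), by simp [pvDirs], by simp [Prod.ext_iff]; omega⟩
  · exact ⟨(-1,0), by simp [pvDirs], by simp [Prod.ext_iff]; omega⟩

lemma pvDirs_nodup : pvDirs.Nodup := by decide

lemma isValid_iff (m : List (List Int)) (nR nC : Int) (r c : Int) :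
    pvIsValid r c nR nC m = true ↔ ValidC m nR nC (r, c) := by
  simp [pvIsValid, ValidC, Inb]
  tauto

-- ---------- stepF facts ----------
lemma stepF_mono (m : List (List Int)) (k k' : Int) (v : Int × Int) (h : k ≤ k') :
    stepF m k v ≤ stepF m k' v := by
  unfold stepF; split <;> omega

lemma stepF_le (m : List (List Int)) (B k : Int) (v : Int × Int)
    (hv : -1 ≤ pvCell m v.1 v.2) (hk : k ≤ B) (hB : 100 ≤ B) : stepF m k v ≤ B := by
  unfold stepF; split
  · omega
  · rename_i h; omega

-- ---------- single relaxation ----------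
lemma relax_update (m : List (List Int)) (nR nC s0 B : Int) (g : List (List Int))
    (u v : Int × Int) (k : Int)
    (hm : MOK m nR nC) (hB : 100 ≤ B) (hg : InvG m nR nC s0 B g)
    (hu : ValidC m nR nC u) (hk0 : 0 ≤ k) (hku : k ≤ gLook g u)
    (hv : ValidC m nR nC v) (hvn : v ∈ pvNbrs u.1 u.2)
    (himp : gLook g v < stepF m k v) :
    InvG m nR nC s0 B (pvSetCell g v.1 v.2 (stepF m k v))
    ∧ SumDef B (pvSetCell g v.1 v.2 (stepF m k v)) ≤ SumDef B g - 1
    ∧ (∀ w, Inb nR nC w → gLook g w ≤ gLook (pvSetCell g v.1 v.2 (stepF m k v)) w)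
    ∧ (∀ w, Inb nR nC w → w ≠ v → gLook (pvSetCell g v.1 v.2 (stepF m k v)) w = gLook g w)
    ∧ gLook (pvSetCell g v.1 v.2 (stepF m k v)) v = stepF m k v := by
  set nf := stepF m k v with hnf
  have hshape := hg.shape
  have hlook := gLook_set nR nC g hshape v hv.1 nf
  have hnfB : nf ≤ B :=
    stepF_le m B k v (hm v hv.1) (le_trans hku (le_gLook nR nC B g hshape hg.le u hu.1)) hB
  have hnfge : -1 ≤ nf := le_trans (ge_gLook nR nC g hshape hg.ge v hv.1) (le_of_lt himp)
  have h00 : Inb nR nC (0, 0) := by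
    rcases hu.1 with ⟨a, b, c, d⟩; exact ⟨le_refl 0, by omega, le_refl 0, by omega⟩
  refine ⟨⟨shape_set nR nC g hshape v hv.1 nf,
      ge_set nR nC g hshape hg.ge v hv.1 nf hnfge,
      le_set nR nC B g hshape hg.le v hv.1 nf hnfB, ?_, ?_, ?_⟩, ?_, ?_, ?_, ?_⟩
  · -- lb
    rw [hlook (0,0) h00]
    split
    · rename_i h
      have hlb := hg.lb
      rw [← h] at hlb
      omega
    · exact hg.lb
  · -- vok
    intro w hw h0
    rw [hlook w hw] at h0
    by_cases hwv : v = w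
    · subst hwv; exact hv
    · rw [if_neg hwv] at h0
      exact hg.vok w hw h0
  · -- ub
    intro h hc w hw
    rw [hlook w hw]
    split
    · rename_i hvw; subst hvw
      have hhu : gLook g u ≤ h u := hg.ub h hc u hu.1
      have h0u : 0 ≤ h u := le_trans hk0 (le_trans hku hhu)
      calc nf ≤ stepF m (h u) v := stepF_mono m k (h u) v (le_trans hku hhu)
        _ ≤ h v := hc.2.2 u hu h0u v hvn hv
    · exact hg.ub h hc w hw
  · -- sum
    rw [sumdef_set nR nC B g hshape v hv.1 nf]; omega
  · -- monotone
    intro w hw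
    rw [hlook w hw]
    split
    · rename_i h; rw [← h]; omega
    · exact le_refl _
  · -- other cells unchanged
    intro w hw hne
    rw [hlook w hw, if_neg (fun h => hne h.symm)]
  · -- v updated
    rw [hlook v hv.1, if_pos rfl]

-- ---------- the A-side per-pop relaxation fold ----------
structure MidA (m : List (List Int)) (nR nC s0 B : Int) (u : Int × Int) (k gu0 : Int)
    (ds : List (Int × Int)) (q : List (Int × Int × Int)) (g : List (List Int)) : Prop where
  grid : InvG m nR nC s0 B g
  qmem : ∀ e ∈ q, ValidC m nR nC e.2 ∧ 0 ≤ -e.1 ∧ -e.1 ≤ gLook g e.2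
  nodup : q.Nodup
  destq : 0 ≤ gLook g (nR - 1, nC - 1) → ∃ e ∈ q, e.2 = (nR - 1, nC - 1)
  closure' : ∀ w, Inb nR nC w → w ≠ u → 0 ≤ gLook g w →
    (∃ e' ∈ q, e'.2 = w ∧ -e'.1 = gLook g w) ∨ ClosedAt m nR nC g w
  uval : gLook g u = gu0
  uwit : k = gu0 ∨ (∃ e' ∈ q, e'.2 = u ∧ -e'.1 = gu0) ∨
    (∀ v ∈ pvNbrs u.1 u.2, ValidC m nR nC v → stepF m gu0 v ≤ gLook g v)
  done : ∀ d ∈ pvDirs, d ∉ ds → ValidC m nR nC (u.1 + d.1, u.2 + d.2) →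
    stepF m k (u.1 + d.1, u.2 + d.2) ≤ gLook g (u.1 + d.1, u.2 + d.2)

lemma foldA (m : List (List Int)) (nR nC s0 B : Int) (e : Int × Int × Int)
    (hm : MOK m nR nC) (hB : 100 ≤ B) (hu : ValidC m nR nC e.2)
    (hk0 : 0 ≤ -e.1) (gu0 : Int) (hk : -e.1 ≤ gu0) :
    ∀ ds q g, (∀ d ∈ ds, d ∈ pvDirs) → ds.Nodup →
      MidA m nR nC s0 B e.2 (-e.1) gu0 ds q g →
      MidA m nR nC s0 B e.2 (-e.1) gu0 []
          (ds.foldl (pvRelaxA m nR nC e) (q, g)).1 (ds.foldl (pvRelaxA m nR nC e) (q, g)).2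
      ∧ ((ds.foldl (pvRelaxA m nR nC e) (q, g)).1.length : Int)
            + 2 * SumDef B (ds.foldl (pvRelaxA m nR nC e) (q, g)).2
          ≤ (q.length : Int) + 2 * SumDef B g := by
  intro ds
  induction ds with
  | nil =>
    intro q g _ _ hmid
    exact ⟨hmid, le_refl _⟩
  | cons d rest ih =>
    intro q g hds hnd hmid
    have hdin : d ∈ pvDirs := hds d (List.mem_cons_self)
    have hdest : Inb nR nC (nR - 1, nC - 1) := by
      rcases hu.1 with ⟨a, b, c, d'⟩; exact ⟨by omega, by omega, by omega, by omega⟩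
    set v : Int × Int := (e.2.1 + d.1, e.2.2 + d.2) with hvdef
    have hvne : v ≠ e.2 := dir_nbr_ne_self e.2 d hdin
    have hstep : ∀ st, (d :: rest).foldl (pvRelaxA m nR nC e) st
        = rest.foldl (pvRelaxA m nR nC e) (pvRelaxA m nR nC e st d) := by
      intro st; rfl
    rw [hstep]
    by_cases hvalid : pvIsValid (e.2.1 + d.1) (e.2.2 + d.2) nR nC m = true
    · have hvc : ValidC m nR nC v := (isValid_iff m nR nC _ _).mp hvalid
      set nf := stepF m (-e.1) v with hnfdef
      have hunf : (if pvCell m (e.2.1 + d.1) (e.2.2 + d.2) = -1 then (100 : Int)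
          else -e.1 - pvCell m (e.2.1 + d.1) (e.2.2 + d.2)) = nf := rfl
      have hcellv : pvCell g (e.2.1 + d.1) (e.2.2 + d.2) = gLook g v := rfl
      by_cases himp : gLook g v < nf
      · -- an improving relaxation: the cell is set and the entry pushed
        have hrel : pvRelaxA m nR nC e (q, g) d
            = ((-nf, v.1, v.2) :: q, pvSetCell g v.1 v.2 nf) := by
          simp only [pvRelaxA, hvalid, if_true, hunf, hcellv]
          rw [if_pos himp]
        rw [hrel]
        have hglv : gLook g v < nf := himp
        obtain ⟨hg', hsum, hmono, hunch, hupd⟩ :=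
          relax_update m nR nC s0 B g e.2 v (-e.1) hm hB hmid.grid hu hk0
            (by rw [hmid.uval]; exact hk) hvc (dir_to_nbr e.2 d hdin) hglv
        have hnf0 : 0 ≤ nf := by
          have hgev := ge_gLook nR nC g hmid.grid.shape hmid.grid.ge v hvc.1
          omega
        set g' := pvSetCell g v.1 v.2 nf with hg'def
        have hveq : (v.1, v.2) = v := rfl
        have hmid' : MidA m nR nC s0 B e.2 (-e.1) gu0 rest ((-nf, v.1, v.2) :: q) g' := by
          refine ⟨hg', ?_, ?_, ?_, ?_, ?_, ?_, ?_⟩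
          · intro e' he'
            rcases List.mem_cons.mp he' with rfl | he'
            · refine ⟨hvc, by simpa using hnf0, ?_⟩
              show -(-nf) ≤ gLook g' v
              rw [hupd]; omega
            · obtain ⟨hv1, hv2, hv3⟩ := hmid.qmem e' he'
              exact ⟨hv1, hv2, le_trans hv3 (hmono e'.2 hv1.1)⟩
          · refine List.Nodup.cons ?_ hmid.nodup
            intro hmem
            obtain ⟨_, _, h3⟩ := hmid.qmem _ hmem
            simp only [neg_neg] at h3
            rw [hveq] at h3
            omega
          · intro hd0
            by_cases hvd : v = (nR - 1, nC - 1)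
            · exact ⟨(-nf, v.1, v.2), List.mem_cons_self, hvd⟩
            · rw [hunch _ hdest (fun h => hvd h.symm)] at hd0
              obtain ⟨e', he', he2⟩ := hmid.destq hd0
              exact ⟨e', List.mem_cons_of_mem _ he', he2⟩
          · intro w hw hwne h0
            by_cases hwv : w = v
            · subst hwv
              refine Or.inl ⟨(-nf, v.1, v.2), List.mem_cons_self, rfl, ?_⟩
              show -(-nf) = gLook g' v
              rw [hupd]; omega
            · rw [hunch w hw hwv] at h0
              rcases hmid.closure' w hw hwne h0 with ⟨e', he', he2, he3⟩ | hcl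
              · exact Or.inl ⟨e', List.mem_cons_of_mem _ he',
                  he2, by rw [hunch w hw hwv]; exact he3⟩
              · refine Or.inr ?_
                intro v' hv' hvcv'
                rw [hunch w hw hwv]
                exact le_trans (hcl v' hv' hvcv') (hmono v' hvcv'.1)
          · rw [hunch e.2 hu.1 (fun h => hvne h.symm)]
            exact hmid.uval
          · rcases hmid.uwit with h1 | ⟨e', he', he2, he3⟩ | h3
            · exact Or.inl h1
            · exact Or.inr (Or.inl ⟨e', List.mem_cons_of_mem _ he', he2, he3⟩)
            · refine Or.inr (Or.inr ?_)
              intro v' hv' hvcv'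
              exact le_trans (h3 v' hv' hvcv') (hmono v' hvcv'.1)
          · intro d' hd' hnr hvcd
            by_cases hdd : d' = d
            · subst hdd
              show nf ≤ gLook g' v
              rw [hupd]
            · have : d' ∉ (d :: rest) := by
                intro hmem
                rcases List.mem_cons.mp hmem with h | h
                · exact hdd h
                · exact hnr h
              have hold := hmid.done d' hd' this hvcd
              exact le_trans hold (hmono _ hvcd.1)
        obtain ⟨hfin, hmeas⟩ := ih _ _ (fun d' hd' => hds d' (List.mem_cons_of_mem _ hd'))
          (List.Nodup.of_cons hnd) hmid'
        refine ⟨hfin, le_trans hmeas ?_⟩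
        simp only [List.length_cons]
        push_cast
        omega
      · -- valid but not improving: nothing changes, the direction is now done
        have hrel : pvRelaxA m nR nC e (q, g) d = (q, g) := by
          simp only [pvRelaxA, hvalid, if_true, hunf, hcellv]
          rw [if_neg himp]
        rw [hrel]
        have hmid' : MidA m nR nC s0 B e.2 (-e.1) gu0 rest q g := by
          refine ⟨hmid.grid, hmid.qmem, hmid.nodup, hmid.destq, hmid.closure',
            hmid.uval, hmid.uwit, ?_⟩
          intro d' hd' hnr hvcd
          by_cases hdd : d' = d
          · subst hdd
            show nf ≤ gLook g v
            omega
          · exact hmid.done d' hd' (by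
              intro hmem
              rcases List.mem_cons.mp hmem with h | h
              · exact hdd h
              · exact hnr h) hvcd
        exact ih _ _ (fun d' hd' => hds d' (List.mem_cons_of_mem _ hd'))
          (List.Nodup.of_cons hnd) hmid'
    · -- invalid neighbour: nothing changes
      have hrel : pvRelaxA m nR nC e (q, g) d = (q, g) := by
        simp only [pvRelaxA]
        rw [if_neg (by simpa using hvalid)]
      rw [hrel]
      have hmid' : MidA m nR nC s0 B e.2 (-e.1) gu0 rest q g := by
        refine ⟨hmid.grid, hmid.qmem, hmid.nodup, hmid.destq, hmid.closure',
          hmid.uval, hmid.uwit, ?_⟩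
        intro d' hd' hnr hvcd
        by_cases hdd : d' = d
        · subst hdd
          exact absurd ((isValid_iff m nR nC _ _).mpr hvcd) hvalid
        · exact hmid.done d' hd' (by
            intro hmem
            rcases List.mem_cons.mp hmem with h | h
            · exact hdd h
            · exact hnr h) hvcd
      exact ih _ _ (fun d' hd' => hds d' (List.mem_cons_of_mem _ hd'))
        (List.Nodup.of_cons hnd) hmid'

-- ---------- the popped entry is in the queue ----------
lemma minEntry_mem : ∀ (ts : List (Int × Int × Int)) (t : Int × Int × Int),
    pvMinEntry t ts ∈ t :: ts := by
  intro ts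
  induction ts with
  | nil => intro t; simp [pvMinEntry]
  | cons d ds ih =>
    intro t
    have : pvMinEntry t (d :: ds) = pvMinEntry (if pvLt d t then d else t) ds := rfl
    rw [this]
    rcases List.mem_cons.mp (ih (if pvLt d t then d else t)) with h | h
    · rw [h]
      split <;> simp
    · simp [h]

-- ---------- the A-side main loop ----------
lemma loopA_eq (m : List (List Int)) (nR nC s0 B : Int) (gB : List (List Int))
    (hm : MOK m nR nC) (hB : 100 ≤ B) (h1 : 1 ≤ nR) (h2 : 1 ≤ nC)
    (hcB : ClosedAbove m nR nC s0 (fun u => gLook gB u))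
    (hBub : ∀ h, ClosedAbove m nR nC s0 h → gLook gB (nR - 1, nC - 1) ≤ h (nR - 1, nC - 1)) :
    ∀ (fuel : Nat) (q : List (Int × Int × Int)) (g : List (List Int)), InvA m nR nC s0 B q g →
      (q.length : Int) + 2 * SumDef B g < (fuel : Int) →
      pvLoopA m nR nC fuel q g = decide (0 ≤ gLook gB (nR - 1, nC - 1)) := by
  intro fuel
  induction fuel with
  | zero =>
    intro q g hinv hmeas
    exfalso
    have hs := sumdef_nonneg B g hinv.grid.le
    have : (0 : Int) ≤ (q.length : Int) := by positivity
    push_cast at hmeas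
    omega
  | succ f ih =>
    intro q g hinv hmeas
    cases q with
    | nil =>
      rw [show pvLoopA m nR nC (f + 1) [] g = false from rfl]
      have hclosed : ClosedAbove m nR nC s0 (fun u => gLook g u) := by
        refine ⟨fun u hu => ge_gLook nR nC g hinv.grid.shape hinv.grid.ge u hu,
          hinv.grid.lb, ?_⟩
        intro u huv h0 v hv hvc
        rcases hinv.closure u huv.1 h0 with ⟨e, he, _⟩ | hcl
        · exact absurd he (List.not_mem_nil)
        · exact hcl v hv hvc
      have h3 := hBub _ hclosed
      simp only at h3
      have h4 : ¬ 0 ≤ gLook g (nR - 1, nC - 1) := by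
        intro h0
        rcases hinv.destq h0 with ⟨e, he, _⟩
        exact absurd he (List.not_mem_nil)
      symm
      rw [decide_eq_false_iff_not]
      omega
    | cons t ts =>
      rw [show pvLoopA m nR nC (f + 1) (t :: ts) g
          = (if (pvMinEntry t ts).2.1 = nR - 1 ∧ (pvMinEntry t ts).2.2 = nC - 1 then true
             else pvLoopA m nR nC f
               (pvDirs.foldl (pvRelaxA m nR nC (pvMinEntry t ts)) ((t :: ts).erase (pvMinEntry t ts), g)).1
               (pvDirs.foldl (pvRelaxA m nR nC (pvMinEntry t ts)) ((t :: ts).erase (pvMinEntry t ts), g)).2)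
        from rfl]
      set e := pvMinEntry t ts with hedef
      have he : e ∈ t :: ts := minEntry_mem ts t
      obtain ⟨hev, hek0, heku⟩ := hinv.qmem e he
      by_cases hd : e.2.1 = nR - 1 ∧ e.2.2 = nC - 1
      · rw [if_pos hd]
        have hedest : e.2 = (nR - 1, nC - 1) := Prod.ext hd.1 hd.2
        have hgd : gLook g (nR - 1, nC - 1) ≤ gLook gB (nR - 1, nC - 1) := by
          have := hinv.grid.ub (fun u => gLook gB u) hcB (nR - 1, nC - 1)
            ⟨by omega, by omega, by omega, by omega⟩
          simpa using this
        rw [hedest] at heku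
        symm
        rw [decide_eq_true_iff]
        omega
      · rw [if_neg hd]
        have hmid0 : MidA m nR nC s0 B e.2 (-e.1) (gLook g e.2) pvDirs
            ((t :: ts).erase e) g := by
          refine ⟨hinv.grid, ?_, List.Nodup.erase _ hinv.nodup, ?_, ?_, rfl, ?_, ?_⟩
          · intro e' he'
            exact hinv.qmem e' (List.mem_of_mem_erase he')
          · intro h0
            obtain ⟨e'', he'', he2⟩ := hinv.destq h0
            have hne : e'' ≠ e := by
              intro hh
              subst hh
              exact hd ⟨by rw [he2], by rw [he2]⟩
            exact ⟨e'', (List.mem_erase_of_ne hne).mpr he'', he2⟩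
          · intro w hw hwne h0
            rcases hinv.closure w hw h0 with ⟨e', he', he2, he3⟩ | hcl
            · have hne : e' ≠ e := by
                intro hh
                subst hh
                exact hwne he2.symm
              exact Or.inl ⟨e', (List.mem_erase_of_ne hne).mpr he', he2, he3⟩
            · exact Or.inr hcl
          · have h0 : 0 ≤ gLook g e.2 := le_trans hek0 heku
            rcases hinv.closure e.2 hev.1 h0 with ⟨e', he', he2, he3⟩ | hcl
            · by_cases hee : e' = e
              · subst hee
                exact Or.inl he3
              · exact Or.inr (Or.inl ⟨e', (List.mem_erase_of_ne hee).mpr he', he2, he3⟩)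
            · exact Or.inr (Or.inr hcl)
          · intro d' hd' hnotin
            exact absurd hd' hnotin
        obtain ⟨hfin, hmeas2⟩ := foldA m nR nC s0 B e hm hB hev hek0 (gLook g e.2) heku
          pvDirs _ g (fun d' hd' => hd') pvDirs_nodup hmid0
        set st := pvDirs.foldl (pvRelaxA m nR nC e) ((t :: ts).erase e, g) with hstdef
        have hinv' : InvA m nR nC s0 B st.1 st.2 := by
          refine ⟨hfin.grid, hfin.qmem, hfin.nodup, hfin.destq, ?_⟩
          intro w hw h0
          by_cases hwu : w = e.2
          · subst hwu
            rcases hfin.uwit with h1' | hwit | hcl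
            · refine Or.inr ?_
              intro v hv hvc
              rw [hfin.uval, ← h1']
              obtain ⟨dd, hdd, hveq⟩ := nbr_to_dir e.2 v hv
              rw [hveq]
              exact hfin.done dd hdd (by simp) (by rw [← hveq]; exact hvc)
            · obtain ⟨e', he', h2', h3'⟩ := hwit
              exact Or.inl ⟨e', he', h2', by rw [hfin.uval]; exact h3'⟩
            · refine Or.inr ?_
              intro v hv hvc
              rw [hfin.uval]
              exact hcl v hv hvc
          · exact hfin.closure' w hw hwu h0
        have hlen : ((t :: ts).erase e).length = ts.length := by
          rw [List.length_erase_of_mem he]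
          rfl
        apply ih st.1 st.2 hinv'
        rw [hlen] at hmeas2
        have hl2 : (t :: ts).length = ts.length + 1 := rfl
        rw [hl2] at hmeas
        push_cast at hmeas hmeas2 ⊢
        omega

-- ---------- the B-side inner relaxation fold ----------
lemma foldB_inner (m : List (List Int)) (nR nC s0 B : Int)
    (hm : MOK m nR nC) (hB : 100 ≤ B) (p : Int × Int) (hp : ValidC m nR nC p)
    (k : Int) (hk0 : 0 ≤ k) :
    ∀ (vs : List (Int × Int)) (g : List (List Int)) (ch : Bool),
      (∀ v ∈ vs, v ∈ pvNbrs p.1 p.2) → InvG m nR nC s0 B g → gLook g p = k →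
      InvG m nR nC s0 B (vs.foldl (pvRelaxB m nR nC k) (g, ch)).1
      ∧ gLook (vs.foldl (pvRelaxB m nR nC k) (g, ch)).1 p = k
      ∧ SumDef B (vs.foldl (pvRelaxB m nR nC k) (g, ch)).1 ≤ SumDef B g
      ∧ ((vs.foldl (pvRelaxB m nR nC k) (g, ch)).2 = ch
          ∨ ((vs.foldl (pvRelaxB m nR nC k) (g, ch)).2 = true
              ∧ SumDef B (vs.foldl (pvRelaxB m nR nC k) (g, ch)).1 ≤ SumDef B g - 1))
      ∧ ((vs.foldl (pvRelaxB m nR nC k) (g, ch)).2 = false →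
          (vs.foldl (pvRelaxB m nR nC k) (g, ch)).1 = g ∧ ch = false
          ∧ ∀ v ∈ vs, ValidC m nR nC v → stepF m k v ≤ gLook g v) := by
  intro vs
  induction vs with
  | nil =>
    intro g ch _ hg hgp
    exact ⟨hg, hgp, le_refl _, Or.inl rfl, fun hf => ⟨rfl, hf, by simp⟩⟩
  | cons v rest ih =>
    intro g ch hvs hg hgp
    have hvnbr : v ∈ pvNbrs p.1 p.2 := hvs v List.mem_cons_self
    have hstep : ∀ st, (v :: rest).foldl (pvRelaxB m nR nC k) st
        = rest.foldl (pvRelaxB m nR nC k) (pvRelaxB m nR nC k st v) := fun st => rfl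
    rw [hstep]
    by_cases hvalid : (decide (0 ≤ v.1) && decide (v.1 < nR) && decide (0 ≤ v.2)
        && decide (v.2 < nC) && decide (pvCell m v.1 v.2 ≠ 0)) = true
    · have hvc : ValidC m nR nC v := by
        simp only [Bool.and_eq_true, decide_eq_true_eq] at hvalid
        exact ⟨⟨hvalid.1.1.1.1, hvalid.1.1.1.2, hvalid.1.1.2, hvalid.1.2⟩, hvalid.2⟩
      set nf := stepF m k v with hnfdef
      have hunf : (if pvCell m v.1 v.2 = -1 then (100 : Int) else k - pvCell m v.1 v.2) = nf := rfl
      by_cases himp : gLook g v < nf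
      · have hrel : pvRelaxB m nR nC k (g, ch) v = (pvSetCell g v.1 v.2 nf, true) := by
          simp only [pvRelaxB, hvalid, if_true, hunf]
          rw [if_pos (show pvCell g v.1 v.2 < nf from himp)]
        rw [hrel]
        obtain ⟨hg', hsum, hmono, hunch, hupd⟩ :=
          relax_update m nR nC s0 B g p v k hm hB hg hp hk0 (le_of_eq hgp.symm) hvc hvnbr himp
        rw [← hnfdef] at hsum
        have hgp' : gLook (pvSetCell g v.1 v.2 nf) p = k := by
          rw [hunch p hp.1 (fun h => (nbr_ne_self p v hvnbr) h.symm)]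
          exact hgp
        obtain ⟨c1, c2, c3, c4, c5⟩ := ih (pvSetCell g v.1 v.2 nf) true
          (fun v' hv' => hvs v' (List.mem_cons_of_mem _ hv')) hg' hgp'
        refine ⟨c1, c2, by omega, ?_, ?_⟩
        · rcases c4 with h | ⟨h, hs⟩
          · exact Or.inr ⟨h, by omega⟩
          · exact Or.inr ⟨h, by omega⟩
        · intro hf
          rcases c4 with h | ⟨h, _⟩ <;> rw [h] at hf <;> exact absurd hf (by simp)
      · have hrel : pvRelaxB m nR nC k (g, ch) v = (g, ch) := by
          simp only [pvRelaxB, hvalid, if_true, hunf]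
          rw [if_neg (show ¬ pvCell g v.1 v.2 < nf from himp)]
        rw [hrel]
        obtain ⟨c1, c2, c3, c4, c5⟩ := ih g ch
          (fun v' hv' => hvs v' (List.mem_cons_of_mem _ hv')) hg hgp
        refine ⟨c1, c2, c3, c4, ?_⟩
        intro hf
        obtain ⟨e1, e2, e3⟩ := c5 hf
        refine ⟨e1, e2, ?_⟩
        intro v' hv' hvc'
        rcases List.mem_cons.mp hv' with rfl | hv'
        · omega
        · exact e3 v' hv' hvc'
    · have hrel : pvRelaxB m nR nC k (g, ch) v = (g, ch) := by
        simp only [pvRelaxB]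
        rw [if_neg (by simpa using hvalid)]
      rw [hrel]
      obtain ⟨c1, c2, c3, c4, c5⟩ := ih g ch
        (fun v' hv' => hvs v' (List.mem_cons_of_mem _ hv')) hg hgp
      refine ⟨c1, c2, c3, c4, ?_⟩
      intro hf
      obtain ⟨e1, e2, e3⟩ := c5 hf
      refine ⟨e1, e2, ?_⟩
      intro v' hv' hvc'
      rcases List.mem_cons.mp hv' with rfl | hv'
      · exact absurd (by
          simp only [Bool.and_eq_true, decide_eq_true_eq]
          obtain ⟨⟨a, b, c, d⟩, hne⟩ := hvc'
          exact ⟨⟨⟨⟨a, b⟩, c⟩, d⟩, hne⟩) hvalid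
      · exact e3 v' hv' hvc'

-- ---------- the B-side per-cell step ----------
lemma cellStepB (m : List (List Int)) (nR nC s0 B : Int)
    (hm : MOK m nR nC) (hB : 100 ≤ B) (p : Int × Int) (hp : Inb nR nC p)
    (g : List (List Int)) (ch : Bool) (hg : InvG m nR nC s0 B g) :
    InvG m nR nC s0 B (pvSweepCell m nR nC (g, ch) p).1
    ∧ SumDef B (pvSweepCell m nR nC (g, ch) p).1 ≤ SumDef B g
    ∧ ((pvSweepCell m nR nC (g, ch) p).2 = ch
        ∨ ((pvSweepCell m nR nC (g, ch) p).2 = true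
            ∧ SumDef B (pvSweepCell m nR nC (g, ch) p).1 ≤ SumDef B g - 1))
    ∧ ((pvSweepCell m nR nC (g, ch) p).2 = false →
        (pvSweepCell m nR nC (g, ch) p).1 = g ∧ ch = false
        ∧ (0 ≤ gLook g p → ClosedAt m nR nC g p)) := by
  by_cases hneg : pvCell g p.1 p.2 < 0
  · have hrel : pvSweepCell m nR nC (g, ch) p = (g, ch) := by
      simp only [pvSweepCell]
      rw [if_pos hneg]
    rw [hrel]
    refine ⟨hg, le_refl _, Or.inl rfl, ?_⟩
    intro hf
    refine ⟨rfl, hf, ?_⟩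
    intro h0
    exact absurd h0 (by show ¬ 0 ≤ pvCell g p.1 p.2; omega)
  · have h0 : 0 ≤ gLook g p := by show 0 ≤ pvCell g p.1 p.2; omega
    have hvp : ValidC m nR nC p := hg.vok p hp h0
    have hrel : pvSweepCell m nR nC (g, ch) p
        = (pvNbrs p.1 p.2).foldl (pvRelaxB m nR nC (pvCell g p.1 p.2)) (g, ch) := by
      simp only [pvSweepCell]
      rw [if_neg hneg]
    rw [hrel]
    obtain ⟨c1, c2, c3, c4, c5⟩ := foldB_inner m nR nC s0 B hm hB p hvp (pvCell g p.1 p.2)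
      (by omega) (pvNbrs p.1 p.2) g ch (fun v hv => hv) hg rfl
    refine ⟨c1, c3, c4, ?_⟩
    intro hf
    obtain ⟨e1, e2, e3⟩ := c5 hf
    exact ⟨e1, e2, fun _ => fun v hv hvc => e3 v hv hvc⟩

-- ---------- the B-side sweep ----------
lemma foldB_sweep (m : List (List Int)) (nR nC s0 B : Int)
    (hm : MOK m nR nC) (hB : 100 ≤ B) :
    ∀ (cs : List (Int × Int)) (g : List (List Int)) (ch : Bool),
      (∀ p ∈ cs, Inb nR nC p) → InvG m nR nC s0 B g →
      InvG m nR nC s0 B (cs.foldl (pvSweepCell m nR nC) (g, ch)).1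
      ∧ SumDef B (cs.foldl (pvSweepCell m nR nC) (g, ch)).1 ≤ SumDef B g
      ∧ ((cs.foldl (pvSweepCell m nR nC) (g, ch)).2 = ch
          ∨ ((cs.foldl (pvSweepCell m nR nC) (g, ch)).2 = true
              ∧ SumDef B (cs.foldl (pvSweepCell m nR nC) (g, ch)).1 ≤ SumDef B g - 1))
      ∧ ((cs.foldl (pvSweepCell m nR nC) (g, ch)).2 = false →
          (cs.foldl (pvSweepCell m nR nC) (g, ch)).1 = g ∧ ch = false
          ∧ ∀ p ∈ cs, 0 ≤ gLook g p → ClosedAt m nR nC g p) := by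
  intro cs
  induction cs with
  | nil =>
    intro g ch _ hg
    exact ⟨hg, le_refl _, Or.inl rfl, fun hf => ⟨rfl, hf, by simp⟩⟩
  | cons p rest ih =>
    intro g ch hcs hg
    have hstep : ∀ st, (p :: rest).foldl (pvSweepCell m nR nC) st
        = rest.foldl (pvSweepCell m nR nC) (pvSweepCell m nR nC st p) := fun st => rfl
    rw [hstep]
    obtain ⟨c1, c2, c3, c4⟩ := cellStepB m nR nC s0 B hm hB p (hcs p List.mem_cons_self) g ch hg
    obtain ⟨d1, d2, d3, d4⟩ := ih (pvSweepCell m nR nC (g, ch) p).1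
      (pvSweepCell m nR nC (g, ch) p).2 (fun p' hp' => hcs p' (List.mem_cons_of_mem _ hp')) c1
    have hpair : ((pvSweepCell m nR nC (g, ch) p).1, (pvSweepCell m nR nC (g, ch) p).2)
        = pvSweepCell m nR nC (g, ch) p := rfl
    rw [hpair] at d1 d2 d3 d4
    refine ⟨d1, by omega, ?_, ?_⟩
    · rcases d3 with h | ⟨h, hs⟩
      · rcases c3 with h2 | ⟨h2, hs2⟩
        · exact Or.inl (h.trans h2)
        · exact Or.inr ⟨h.trans h2, by omega⟩
      · exact Or.inr ⟨h, by omega⟩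
    · intro hf
      obtain ⟨e1, e2, e3⟩ := d4 hf
      obtain ⟨f1, f2, f3⟩ := c4 e2
      refine ⟨by rw [e1, f1], f2, ?_⟩
      intro p' hp' h0
      rcases List.mem_cons.mp hp' with rfl | hp'
      · exact f3 h0
      · rw [f1] at e3
        exact e3 p' hp' h0

-- ---------- cell enumeration ----------
lemma mem_pvCells_iff (nR nC : Int) (u : Int × Int) :
    u ∈ pvCells nR nC ↔ Inb nR nC u := by
  constructor
  · intro h
    rcases List.mem_flatMap.mp h with ⟨r, hr, hm2⟩
    rcases List.mem_map.mp hm2 with ⟨c, hc, rfl⟩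
    have hr' := List.mem_range.mp hr
    have hc' := List.mem_range.mp hc
    refine ⟨?_, ?_, ?_, ?_⟩ <;> simp [Int.ofNat_eq_natCast] <;> omega
  · rintro ⟨h1, h2, h3, h4⟩
    have hr : u.1.toNat ∈ List.range nR.toNat := List.mem_range.mpr (by omega)
    have hc : u.2.toNat ∈ List.range nC.toNat := List.mem_range.mpr (by omega)
    refine List.mem_flatMap.mpr ⟨u.1.toNat, hr, List.mem_map.mpr ⟨u.2.toNat, hc, ?_⟩⟩
    refine Prod.ext ?_ ?_ <;> simp [Int.ofNat_eq_natCast] <;> omega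

-- ---------- the B-side main loop ----------
lemma loopB_main (m : List (List Int)) (nR nC s0 B : Int)
    (hm : MOK m nR nC) (hB : 100 ≤ B) :
    ∀ (fuel : Nat) (g : List (List Int)), InvG m nR nC s0 B g →
      SumDef B g < (fuel : Int) →
      InvG m nR nC s0 B (pvLoopB m nR nC fuel g)
      ∧ ClosedAbove m nR nC s0 (fun u => gLook (pvLoopB m nR nC fuel g) u) := by
  intro fuel
  induction fuel with
  | zero =>
    intro g hg hmeas
    exfalso
    have := sumdef_nonneg B g hg.le
    push_cast at hmeas
    omega
  | succ f ih =>
    intro g hg hmeas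
    have hcells : ∀ p ∈ pvCells nR nC, Inb nR nC p :=
      fun p hp => (mem_pvCells_iff nR nC p).mp hp
    obtain ⟨c1, c2, c3, c4⟩ := foldB_sweep m nR nC s0 B hm hB (pvCells nR nC) g false hcells hg
    rw [show pvLoopB m nR nC (f + 1) g
        = (if ((pvCells nR nC).foldl (pvSweepCell m nR nC) (g, false)).2 = true
           then pvLoopB m nR nC f ((pvCells nR nC).foldl (pvSweepCell m nR nC) (g, false)).1
           else ((pvCells nR nC).foldl (pvSweepCell m nR nC) (g, false)).1) from rfl]
    by_cases hflag : ((pvCells nR nC).foldl (pvSweepCell m nR nC) (g, false)).2 = true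
    · rw [if_pos hflag]
      have hdec : SumDef B ((pvCells nR nC).foldl (pvSweepCell m nR nC) (g, false)).1
          ≤ SumDef B g - 1 := by
        rcases c3 with h | ⟨_, hs⟩
        · rw [h] at hflag; exact absurd hflag (by simp)
        · exact hs
      apply ih _ c1
      push_cast at hmeas ⊢
      omega
    · rw [if_neg hflag]
      have hff : ((pvCells nR nC).foldl (pvSweepCell m nR nC) (g, false)).2 = false := by
        cases hb : ((pvCells nR nC).foldl (pvSweepCell m nR nC) (g, false)).2
        · rfl
        · exact absurd hb hflag
      obtain ⟨e1, _, e3⟩ := c4 hff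
      rw [e1]
      refine ⟨hg, fun u hu => ge_gLook nR nC g hg.shape hg.ge u hu, hg.lb, ?_⟩
      intro u huv h0 v hv hvc
      exact e3 u ((mem_pvCells_iff nR nC u).mpr huv.1) h0 v hv hvc

-- ---------- the initial grid ----------
lemma shape_replicate (nR nC : Int) :
    Shape nR nC (List.replicate nR.toNat (List.replicate nC.toNat (-1 : Int))) := by
  constructor
  · rw [List.length_replicate]
  · intro row hrow
    rw [List.eq_of_mem_replicate hrow, List.length_replicate]

lemma look_replicate (nR nC : Int) (u : Int × Int) (hu : Inb nR nC u) :
    gLook (List.replicate nR.toNat (List.replicate nC.toNat (-1 : Int))) u = -1 := by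
  obtain ⟨h1, h2, h3, h4⟩ := hu
  have hrow : (List.replicate nR.toNat (List.replicate nC.toNat (-1 : Int))).getD u.1.toNat []
      = List.replicate nC.toNat (-1 : Int) := by
    rw [List.getD_eq_getElem _ _ (by rw [List.length_replicate]; omega), List.getElem_replicate]
  unfold gLook pvCell pvAt
  rw [hrow, List.getD_eq_getElem _ _ (by rw [List.length_replicate]; omega),
    List.getElem_replicate]

lemma ge_replicate (nR nC : Int) :
    GridGE (List.replicate nR.toNat (List.replicate nC.toNat (-1 : Int))) := by
  intro row hrow x hx
  rw [List.eq_of_mem_replicate hrow] at hx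
  rw [List.eq_of_mem_replicate hx]

lemma le_replicate (nR nC B : Int) (hB : -1 ≤ B) :
    GridLE B (List.replicate nR.toNat (List.replicate nC.toNat (-1 : Int))) := by
  intro row hrow x hx
  rw [List.eq_of_mem_replicate hrow] at hx
  rw [List.eq_of_mem_replicate hx]
  omega

lemma sumdef_replicate (nR nC B : Int) :
    SumDef B (List.replicate nR.toNat (List.replicate nC.toNat (-1 : Int)))
      = (nR.toNat : Int) * ((nC.toNat : Int) * (B + 1)) := by
  unfold SumDef rowSum
  rw [List.map_replicate, List.map_replicate]
  rw [List.sum_replicate, List.sum_replicate]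
  rw [nsmul_eq_mul, nsmul_eq_mul]
  norm_num

-- ---------- the top-level equivalence ----------
lemma main_eq (map_data : List (List Int)) (start_fuel numRows numCols : Int)
    (hpre : Pre_can_reach_destination map_data start_fuel numRows numCols) :
    can_reach_destination map_data start_fuel numRows numCols
      = can_reach_destination_alt map_data start_fuel numRows numCols := by
  by_cases h0 : pvCell map_data 0 0 = 0
  · simp only [can_reach_destination, can_reach_destination_alt, if_pos h0]
  · simp only [can_reach_destination, can_reach_destination_alt, if_neg h0]
    set s0 : Int := if pvCell map_data 0 0 = -1 then 100 else start_fuel - pvCell map_data 0 0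
      with hs0def
    by_cases hneg : s0 < 0
    · rw [if_pos hneg, if_pos hneg]
    · rw [if_neg hneg, if_neg hneg]
      -- only the third branch of Pre_ can hold here
      have hat : pvAt map_data 0 0 = pvCell map_data 0 0 := rfl
      rcases hpre with ⟨_, _, hz⟩ | ⟨_, _, _, _, hne1, hlt⟩ | ⟨h1R, h1C, hlen, hrows, hent⟩
      · rw [hat] at hz; exact absurd hz h0
      · rw [hat] at hne1 hlt
        rw [hs0def, if_neg hne1] at hneg
        exact absurd hlt hneg
      · set B : Int := max start_fuel 100 with hBdef
        have hB : (100 : Int) ≤ B := le_max_right _ _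
        have hm : MOK map_data numRows numCols := by
          intro u hu
          obtain ⟨a, b, c, d⟩ := hu
          have := hent u.1.toNat (List.mem_range.mpr (by omega)) u.2.toNat
            (List.mem_range.mpr (by omega))
          exact this
        have h00 : Inb numRows numCols (0, 0) := ⟨le_refl 0, by omega, le_refl 0, by omega⟩
        have hm00 : -1 ≤ pvCell map_data 0 0 := hm (0, 0) h00
        have hs0nn : 0 ≤ s0 := by omega
        have hs0B : s0 ≤ B := by
          rw [hs0def]
          split
          · omega
          · rename_i hne1
            have : (1 : Int) ≤ pvCell map_data 0 0 := by omega
            have : start_fuel ≤ B := le_max_left _ _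
            omega
        set rem0 : List (List Int) :=
          List.replicate numRows.toNat (List.replicate numCols.toNat (-1 : Int)) with hrem0def
        set rem1 : List (List Int) := pvSetCell rem0 0 0 s0 with hrem1def
        have hshape0 : Shape numRows numCols rem0 := shape_replicate numRows numCols
        have hset := gLook_set numRows numCols rem0 hshape0 (0, 0) h00 s0
        have hlook1 : ∀ u, Inb numRows numCols u →
            gLook rem1 u = if ((0 : Int), (0 : Int)) = u then s0 else gLook rem0 u :=
          fun u hu => hset u hu
        have hinvg : InvG map_data numRows numCols s0 B rem1 := by
          refine ⟨shape_set numRows numCols rem0 hshape0 (0, 0) h00 s0,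
            ge_set numRows numCols rem0 hshape0 (ge_replicate numRows numCols) (0, 0) h00 s0
              (by omega),
            le_set numRows numCols B rem0 hshape0 (le_replicate numRows numCols B (by omega))
              (0, 0) h00 s0 hs0B, ?_, ?_, ?_⟩
          · rw [hlook1 (0, 0) h00, if_pos rfl]
          · intro u hu hge
            rw [hlook1 u hu] at hge
            by_cases he : ((0 : Int), (0 : Int)) = u
            · rw [← he]
              exact ⟨h00, h0⟩
            · rw [if_neg he, look_replicate numRows numCols u hu] at hge
              omega
          · intro h hc u hu
            rw [hlook1 u hu]
            by_cases he : ((0 : Int), (0 : Int)) = u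
            · rw [if_pos he, ← he]
              exact hc.2.1
            · rw [if_neg he, look_replicate numRows numCols u hu]
              exact hc.1 u hu
        have hsum1 : SumDef B rem1 = (numRows.toNat : Int) * ((numCols.toNat : Int) * (B + 1)) - 1 - s0 := by
          rw [hrem1def, sumdef_set numRows numCols B rem0 hshape0 (0, 0) h00 s0,
            look_replicate numRows numCols (0, 0) h00, sumdef_replicate numRows numCols B]
          ring
        have hcastR : ((numRows.toNat : Nat) : Int) = numRows := Int.toNat_of_nonneg (by omega)
        have hcastC : ((numCols.toNat : Nat) : Int) = numCols := Int.toNat_of_nonneg (by omega)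
        have hprod : (numRows.toNat : Int) * ((numCols.toNat : Int) * (B + 1))
            = numRows * numCols * (B + 1) := by
          rw [hcastR, hcastC]; ring
        have hprodpos : 0 ≤ numRows * numCols * (B + 1) := by positivity
        have hfB : ((pvFuelB start_fuel numRows numCols : Nat) : Int)
            = numRows * numCols * (B + 1) + 1 := by
          rw [pvFuelB, ← hBdef, Int.toNat_of_nonneg (by nlinarith [hprodpos])]
        have hfA : ((pvFuelA start_fuel numRows numCols : Nat) : Int)
            = 2 * (numRows * numCols) * (B + 1) + 2 := by
          rw [pvFuelA, ← hBdef, Int.toNat_of_nonneg (by nlinarith [hprodpos])]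
        obtain ⟨hgBinv, hgBclosed⟩ := loopB_main map_data numRows numCols s0 B hm hB
          (pvFuelB start_fuel numRows numCols) rem1 hinvg
          (by rw [hfB, hsum1, hprod]; linarith [hs0nn])
        set gB : List (List Int) :=
          pvLoopB map_data numRows numCols (pvFuelB start_fuel numRows numCols) rem1 with hgBdef
        have hdest : Inb numRows numCols (numRows - 1, numCols - 1) :=
          ⟨by omega, by omega, by omega, by omega⟩
        have hinva : InvA map_data numRows numCols s0 B [(-s0, 0, 0)] rem1 := by
          refine ⟨hinvg, ?_, List.nodup_singleton _, ?_, ?_⟩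
          · intro e he
            rw [List.mem_singleton] at he
            subst he
            refine ⟨⟨h00, h0⟩, by omega, ?_⟩
            show -(-s0) ≤ gLook rem1 (0, 0)
            rw [hlook1 (0, 0) h00, if_pos rfl]
            omega
          · intro hd
            by_cases he : ((0 : Int), (0 : Int)) = (numRows - 1, numCols - 1)
            · exact ⟨(-s0, 0, 0), List.mem_singleton_self _, he⟩
            · rw [hlook1 _ hdest, if_neg he, look_replicate numRows numCols _ hdest] at hd
              omega
          · intro u hu hge
            rw [hlook1 u hu] at hge
            by_cases he : ((0 : Int), (0 : Int)) = u
            · refine Or.inl ⟨(-s0, 0, 0), List.mem_singleton_self _, he, ?_⟩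
              rw [hlook1 u hu, if_pos he]
              omega
            · rw [if_neg he, look_replicate numRows numCols u hu] at hge
              omega
        have hfinal := loopA_eq map_data numRows numCols s0 B gB hm hB h1R h1C hgBclosed
          (fun h hc => hgBinv.ub h hc (numRows - 1, numCols - 1) hdest)
          (pvFuelA start_fuel numRows numCols) [(-s0, 0, 0)] rem1 hinva
          (by
            rw [hfA, hsum1, hprod]
            simp only [List.length_singleton]
            push_cast
            linarith [hs0nn])
        exact hfinal

-- ===== VERDICT (by name: the statement is the Claim_ definition above) =====
theorem can_reach_destination_spec : Claim_equal_can_reach_destination := by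
  intro map_data start_fuel numRows numCols _ hpre
  unfold Spec_can_reach_destination
  exact main_eq map_data start_fuel numRows numCols hpre
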